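-- pv_equiv track=rewrite | github.com/wesleyjcr/desafios-uri | desafios/3 - Strings/criptografia.py | desloca_letras_esquerda
-- ===== SOURCE A (Python) =====
-- def desloca_letras_esquerda(entrada):
--     saida = ""
--     tamanho_texto = len(entrada)
--
--     for index, item in enumerate(entrada):
--         if index + 1 > tamanho_texto / 2:
--             saida += chr(ord(item) - 1)
--         else:
--             saida += item
--
--     return saida
-- ===== SOURCE B (Python) =====
-- def desloca_letras_esquerda(entrada):
--     split = len(entrada) // 2
--     return entrada[:split] + ''.join(chr(ord(c) - 1) for c in entrada[split:])
-- ===== Notes on version B (the rewrite author's own statement) =====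
-- stated objective: simpler
-- what changed: Replaced the per-character enumerate loop with a float-threshold branch and string += by a precomputed integer split point len//2 and two slices: the first half verbatim, the second half mapped through chr(ord(c)-1) and joined once.
import Mathlib
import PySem

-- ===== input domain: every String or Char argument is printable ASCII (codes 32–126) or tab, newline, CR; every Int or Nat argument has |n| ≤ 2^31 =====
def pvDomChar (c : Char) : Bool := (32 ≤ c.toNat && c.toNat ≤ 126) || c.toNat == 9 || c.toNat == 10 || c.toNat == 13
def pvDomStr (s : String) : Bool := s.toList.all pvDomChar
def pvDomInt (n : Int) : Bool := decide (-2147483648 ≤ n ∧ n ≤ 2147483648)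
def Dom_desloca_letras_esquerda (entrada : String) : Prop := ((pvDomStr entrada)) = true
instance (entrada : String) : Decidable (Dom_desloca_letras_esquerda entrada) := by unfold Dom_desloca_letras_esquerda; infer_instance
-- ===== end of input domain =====

-- B replaces A's per-character branch-in-loop with a precomputed split point len//2 and
-- two slices (first half verbatim, second half shifted): simpler decomposition, same values.


-- ===== PORT A =====
-- Python's 'index + 1 > tamanho / 2' is a float comparison; for integers of any realistic
-- string length (< 2^52) it is exactly '2 * (index + 1) > tamanho', ported as such.
def desloca_letras_esquerda (entrada : String) : String :=
  let tamanho : Int := PySem.Str.len entrada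
  String.ofList ((PySem.List.enumerate entrada.toList 0).foldl
    (fun saida p =>
      if 2 * (p.1 + 1) > tamanho then saida ++ [Char.ofNat (p.2.toNat - 1)]
      else saida ++ [p.2]) [])

-- ===== PORT B =====
def desloca_letras_esquerda_alt (entrada : String) : String :=
  let cs := entrada.toList
  let split := cs.length / 2
  String.ofList (cs.take split ++ (cs.drop split).map (fun c => Char.ofNat (c.toNat - 1)))

-- ===== PRECONDITION & SPEC =====
def Spec_desloca_letras_esquerda (entrada : String) (out : String) : Prop := out = desloca_letras_esquerda_alt entrada
instance (entrada : String) (out : String) : Decidable (Spec_desloca_letras_esquerda entrada out) := by unfold Spec_desloca_letras_esquerda; infer_instance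

-- ===== CLAIM (what is proved, stated in full; the proofs are below) =====
def Claim_equal_desloca_letras_esquerda : Prop := ∀ (entrada : String), Dom_desloca_letras_esquerda entrada → Spec_desloca_letras_esquerda entrada (desloca_letras_esquerda entrada)

-- ===== LEMMAS AND PROOFS =====

-- A's enumerate-and-branch map equals B's take/drop split at N/2, for any start index s.
-- (n is A's 'tamanho' kept abstract so the lemma matches the port's term exactly.)
lemma enum_map_split (N : Nat) (n : Int) (hn : n = (N : Int)) (cs : List Char) (s : Nat) :
    (PySem.List.enumerate cs (s : Int)).map
        (fun p => if 2 * (p.1 + 1) > n then Char.ofNat (p.2.toNat - 1) else p.2)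
      = cs.take (N / 2 - s) ++ (cs.drop (N / 2 - s)).map (fun c => Char.ofNat (c.toNat - 1)) := by
  subst hn
  induction cs generalizing s with
  | nil => simp [PySem.List.enumerate_nil]
  | cons c cs ih =>
    rw [PySem.List.enumerate_cons, List.map_cons]
    have hs : ((s : Int) + 1) = ((s + 1 : Nat) : Int) := by push_cast; ring
    rw [hs, ih (s + 1)]
    by_cases h : s < N / 2
    · have hc : ¬ (2 * (((s + 1 : Nat) : Int)) > (N : Int)) := by
        have : 2 * (s + 1) ≤ N := by omega
        push_cast; omega
      have h1 : N / 2 - s = (N / 2 - (s + 1)) + 1 := by omega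
      rw [if_neg hc, h1]
      simp only [List.take_succ_cons, List.drop_succ_cons, List.cons_append]
    · have hc : 2 * (((s + 1 : Nat) : Int)) > (N : Int) := by
        have : N < 2 * (s + 1) := by omega
        push_cast; omega
      have h0 : N / 2 - s = 0 := by omega
      have h0' : N / 2 - (s + 1) = 0 := by omega
      rw [if_pos hc, h0, h0']
      simp only [List.take_zero, List.drop_zero, List.nil_append, List.map_cons]

-- ===== VERDICT (by name: the statement is the Claim_ definition above) =====
theorem desloca_letras_esquerda_spec : Claim_equal_desloca_letras_esquerda := by
  intro entrada _
  unfold Spec_desloca_letras_esquerda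
  have hA : desloca_letras_esquerda entrada
      = String.ofList ((PySem.List.enumerate entrada.toList 0).foldl
          (fun saida p =>
            if 2 * (p.1 + 1) > PySem.Str.len entrada then saida ++ [Char.ofNat (p.2.toNat - 1)]
            else saida ++ [p.2]) []) := rfl
  have hB : desloca_letras_esquerda_alt entrada
      = String.ofList (entrada.toList.take (entrada.toList.length / 2)
          ++ (entrada.toList.drop (entrada.toList.length / 2)).map (fun c => Char.ofNat (c.toNat - 1))) := rfl
  rw [hA, hB]
  have hfun : (fun (saida : List Char) (p : Int × Char) =>
      if 2 * (p.1 + 1) > PySem.Str.len entrada then saida ++ [Char.ofNat (p.2.toNat - 1)]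
      else saida ++ [p.2])
    = (fun saida p => saida ++ [if 2 * (p.1 + 1) > PySem.Str.len entrada then Char.ofNat (p.2.toNat - 1) else p.2]) := by
    funext saida p; split <;> rfl
  rw [hfun, PySem.List.foldl_append_singleton_eq_map, List.nil_append]
  have hsplit := enum_map_split entrada.toList.length (PySem.Str.len entrada)
    (by simp [PySem.Str.len_eq]) entrada.toList 0
  simp only [Nat.cast_zero, Nat.sub_zero] at hsplit
  rw [hsplit]
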